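-- pv_equiv track=rewrite | github.com/Ghoneimer/yolo_keras_implementation | gen_yolo_truth.py | photo_numbering
-- ===== SOURCE A (Python) =====
-- def photo_numbering(data_set):
--     z=data_set
--     lp=z[0]
--     photo_no=[]
--     n=0
--     for i in range(0,len(z)):
--         if(z[i]!=lp):
--             n+=1
--             lp=z[i]
--         else:
--             n=n
--         photo_no.append(n)
--     return photo_no
-- ===== SOURCE B (Python) =====
-- from itertools import accumulate
--
-- def photo_numbering(data_set):
--     # pair each element with its predecessor (the first element with itself),
--     # flag a change, and prefix-sum the flags
--     prev = [data_set[0]] + data_set[:-1]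
--     flags = (int(a != b) for a, b in zip(data_set, prev))
--     return list(accumulate(flags))
-- ===== Notes on version B (the rewrite author's own statement) =====
-- stated objective: alternative
-- what changed: Replaces A's branch-driven counter loop (mutable lp/n state, explicit append) with a pipeline: build a shifted-predecessor list, map pairs to 0/1 change flags, and prefix-sum them with itertools.accumulate.
import Mathlib
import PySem

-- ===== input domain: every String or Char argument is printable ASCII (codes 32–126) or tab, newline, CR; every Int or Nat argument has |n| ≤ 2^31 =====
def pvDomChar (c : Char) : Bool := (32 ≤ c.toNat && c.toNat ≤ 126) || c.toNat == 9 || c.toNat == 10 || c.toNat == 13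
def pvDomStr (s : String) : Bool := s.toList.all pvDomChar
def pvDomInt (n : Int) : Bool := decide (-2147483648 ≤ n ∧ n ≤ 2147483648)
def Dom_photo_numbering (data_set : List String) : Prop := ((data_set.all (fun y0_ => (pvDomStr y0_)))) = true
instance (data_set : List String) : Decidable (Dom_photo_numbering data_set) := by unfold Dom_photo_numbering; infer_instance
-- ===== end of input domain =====

-- B replaces A's branch-driven counter loop with a predecessor-shift / change-flags / prefix-sum pipeline (alternative decomposition, same O(n) cost).


-- ===== PORT A =====
-- lp=z[0]; n=0; for i in range(0,len(z)): if z[i]!=lp: n+=1; lp=z[i]; photo_no.append(n)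
def photo_numbering (data_set : List String) : List Int :=
  match PySem.List.pyGet? data_set 0 with
  | none => []          -- Python raises IndexError here; excluded by Pre_
  | some lp0 =>
    ((PySem.List.pyRange 0 (PySem.List.len data_set) 1).foldl
      (fun (s : String × Int × List Int) i =>
        let zi := PySem.List.pyGetD data_set i ""   -- index always in range inside the loop
        if zi ≠ s.1 then (zi, s.2.1 + 1, s.2.2 ++ [s.2.1 + 1])
        else (s.1, s.2.1, s.2.2 ++ [s.2.1]))
      (lp0, 0, [])).2.2

-- ===== PORT B =====
-- accumulate (running sums), faithful to itertools.accumulate on ints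
def pvAccum (s : Int) : List Int → List Int
  | [] => []
  | x :: t => (s + x) :: pvAccum (s + x) t

-- prev = [data_set[0]] + data_set[:-1]; flags = (int(a!=b) for a,b in zip(data_set, prev)); list(accumulate(flags))
def photo_numbering_alt (data_set : List String) : List Int :=
  match PySem.List.pyGet? data_set 0 with
  | none => []          -- Python raises IndexError here; excluded by Pre_
  | some h =>
    let prev := [h] ++ PySem.List.slice data_set none (some (-1))
    let flags := (data_set.zip prev).map (fun p => if p.1 ≠ p.2 then (1 : Int) else 0)
    pvAccum 0 flags

-- ===== PRECONDITION & SPEC =====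
-- A evaluates data_set[0] and raises IndexError on the empty list; Pre_ excludes exactly that.
def Pre_photo_numbering (data_set : List String) : Prop := data_set ≠ []
instance (data_set : List String) : Decidable (Pre_photo_numbering data_set) := by unfold Pre_photo_numbering; infer_instance
def pvWitness_photo_numbering : List String := (["a", "a", "b"])

def Spec_photo_numbering (data_set : List String) (out : List Int) : Prop := out = photo_numbering_alt data_set
instance (data_set : List String) (out : List Int) : Decidable (Spec_photo_numbering data_set out) := by unfold Spec_photo_numbering; infer_instance

-- ===== CLAIM (what is proved, stated in full; the proofs are below) =====
def Claim_equal_photo_numbering : Prop := ∀ (data_set : List String), Dom_photo_numbering data_set → Pre_photo_numbering data_set → Spec_photo_numbering data_set (photo_numbering data_set)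

-- ===== LEMMAS AND PROOFS =====

-- reference recursion: A's loop state advanced down the list
def pvRunA (lp : String) (n : Int) : List String → List Int
  | [] => []
  | x :: xs => if x ≠ lp then (n + 1) :: pvRunA x (n + 1) xs else n :: pvRunA lp n xs

lemma pvA_fold (xs : List String) (lp : String) (n : Int) (acc : List Int) :
    (xs.foldl
      (fun (s : String × Int × List Int) zi =>
        if zi ≠ s.1 then (zi, s.2.1 + 1, s.2.2 ++ [s.2.1 + 1])
        else (s.1, s.2.1, s.2.2 ++ [s.2.1]))
      (lp, n, acc)).2.2 = acc ++ pvRunA lp n xs := by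
  induction xs generalizing lp n acc with
  | nil => simp [pvRunA]
  | cons x xs ih =>
    simp only [List.foldl_cons]
    by_cases h : x = lp
    · rw [if_neg (fun hn => hn h), ih]; simp [pvRunA, h]
    · rw [if_pos h, ih]; simp [pvRunA, h]

lemma pvRunA_eq_accum (xs : List String) (lp : String) (n : Int) :
    pvRunA lp n xs
      = pvAccum n ((xs.zip (lp :: xs)).map (fun p => if p.1 ≠ p.2 then (1 : Int) else 0)) := by
  induction xs generalizing lp n with
  | nil => simp [pvRunA, pvAccum]
  | cons x xs ih =>
    by_cases h : x = lp <;> simp [pvRunA, pvAccum, h, ih]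

lemma pvZip_take (xs : List String) (ys : List String) :
    xs.zip (ys.take xs.length) = xs.zip ys := by
  induction xs generalizing ys with
  | nil => simp
  | cons x xs ih =>
    cases ys with
    | nil => simp
    | cons y ys => simp [ih]

-- ===== VERDICT (by name: the statement is the Claim_ definition above) =====
theorem photo_numbering_spec : Claim_equal_photo_numbering := by
  intro data_set _ hpre
  cases data_set with
  | nil => exact absurd rfl hpre
  | cons h t =>
    show photo_numbering (h :: t) = photo_numbering_alt (h :: t)
    unfold photo_numbering photo_numbering_alt
    have hget : PySem.List.pyGet? (h :: t) 0 = some h := by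
      simp [PySem.List.pyGet?, PySem.List.pyIdx?]
    rw [hget]
    dsimp only
    rw [show PySem.List.len (h :: t) = ((h :: t).length : Int) from rfl]
    rw [PySem.List.foldl_pyRange_zero_pyGetD' (h :: t) ""
      (fun (s : String × Int × List Int) zi =>
        if zi ≠ s.1 then (zi, s.2.1 + 1, s.2.2 ++ [s.2.1 + 1])
        else (s.1, s.2.1, s.2.2 ++ [s.2.1])) (h, 0, [])]
    rw [pvA_fold, PySem.List.slice_to_neg_one]
    have hdl : (h :: t).dropLast = (h :: t).take t.length := by
      simp [List.dropLast_eq_take]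
    simp only [pvRunA_eq_accum, hdl, List.nil_append, List.singleton_append]
    have := pvZip_take (h :: t) (h :: h :: t)
    simp only [List.length_cons, List.take_succ_cons] at this
    rw [this]
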